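-- pv_equiv track=rewrite | github.com/starostin13/Care | generate_map_image.py | reconstruct_coordinates
-- ===== SOURCE A (Python) =====
-- HEX_DIRECTIONS = [
--     (1, 0), (1, -1), (0, -1),
--     (-1, 0), (-1, 1), (0, 1)
-- ]
--
-- def hex_ring(center_q, center_r, radius):
--     if radius == 0:
--         return [(center_q, center_r)]
--     results = []
--     q = center_q + HEX_DIRECTIONS[4][0] * radius
--     r = center_r + HEX_DIRECTIONS[4][1] * radius
--     for i in range(6):
--         for _ in range(radius):
--             results.append((q, r))
--             dq, dr = HEX_DIRECTIONS[i]
--             q += dq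
--             r += dr
--     return results
--
-- def reconstruct_coordinates(total_hexes):
--     """Return dict  hex_id → (q, r)  using the same ring-walk as generate_planet.py."""
--     coords = {1: (0, 0)}
--     current_id = 2
--     radius = 1
--     while current_id <= total_hexes:
--         for q, r in hex_ring(0, 0, radius):
--             if current_id > total_hexes:
--                 break
--             coords[current_id] = (q, r)
--             current_id += 1
--         radius += 1
--         if radius > 50:
--             break
--     return coords
-- ===== SOURCE B (Python) =====
-- HEX_DIRECTIONS = [
--     (1, 0), (1, -1), (0, -1),
--     (-1, 0), (-1, 1), (0, 1)
-- ]
--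
-- # corner s of the unit ring = (-1,1) + sum of the first s directions
-- RING_CORNERS = [
--     (-1, 1), (0, 1), (1, 0),
--     (1, -1), (0, -1), (-1, 0)
-- ]
--
-- def reconstruct_coordinates(total_hexes):
--     """Return dict  hex_id -> (q, r)  by direct spiral-index arithmetic (no ring lists)."""
--     coords = {1: (0, 0)}
--     last = min(total_hexes, 7651)
--     for hex_id in range(2, last + 1):
--         k = hex_id - 2                     # zero-based index along the spiral
--         r = 1                              # ring radius: smallest r with k < 3*r*(r+1)
--         while 3 * r * (r + 1) <= k:
--             r += 1
--         offset = k - 3 * (r - 1) * r       # position within ring r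
--         side, step = divmod(offset, r)
--         cq, cr = RING_CORNERS[side]
--         dq, dr = HEX_DIRECTIONS[side]
--         coords[hex_id] = (cq * r + dq * step, cr * r + dr * step)
--     return coords
-- ===== Notes on version B (the rewrite author's own statement) =====
-- stated objective: alternative
-- what changed: B replaces the ring-walk (building each hex_ring list and walking it while counting ids) by direct spiral-index arithmetic: for each id it computes the ring radius, side and step from the index alone and reads the coordinate from a corner/direction formula, building no ring lists.
import Mathlib
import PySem

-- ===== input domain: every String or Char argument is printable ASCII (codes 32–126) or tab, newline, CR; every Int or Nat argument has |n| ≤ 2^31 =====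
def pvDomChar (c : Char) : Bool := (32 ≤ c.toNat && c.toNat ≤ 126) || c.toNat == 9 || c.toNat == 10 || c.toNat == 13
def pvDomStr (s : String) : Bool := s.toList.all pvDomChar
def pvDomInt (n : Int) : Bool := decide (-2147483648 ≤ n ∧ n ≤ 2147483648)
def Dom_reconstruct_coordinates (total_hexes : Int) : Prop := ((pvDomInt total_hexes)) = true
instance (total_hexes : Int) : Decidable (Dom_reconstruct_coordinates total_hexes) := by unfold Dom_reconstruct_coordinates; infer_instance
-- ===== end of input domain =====

-- B replaces the ring-walk by per-id spiral-index arithmetic (radius/side/step from the index alone); same values, no ring lists built.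

-- ===== PORT A =====
def HEX_DIRECTIONS : List (Int × Int) := [(1,0),(1,-1),(0,-1),(-1,0),(-1,1),(0,1)]

def hex_ring (center_q center_r radius : Int) : List (Int × Int) :=
  if radius = 0 then [(center_q, center_r)]
  else
    let d4 := PySem.List.pyGetD HEX_DIRECTIONS 4 (0, 0)
    let st := (PySem.List.pyRange 0 6 1).foldl
      (fun (st : List (Int × Int) × Int × Int) i =>
        (PySem.List.pyRange 0 radius 1).foldl
          (fun (st : List (Int × Int) × Int × Int) _ =>
            let results := st.1 ++ [(st.2.1, st.2.2)]
            let d := PySem.List.pyGetD HEX_DIRECTIONS i (0, 0)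
            (results, st.2.1 + d.1, st.2.2 + d.2)) st)
      (([], center_q + d4.1 * radius, center_r + d4.2 * radius))
    st.1

-- inner `for q, r in hex_ring(...)` with its break on current_id > total_hexes
def pvAInner (n : Int) (st : PySem.Dict Int (Int × Int) × Int) :
    List (Int × Int) → PySem.Dict Int (Int × Int) × Int
  | [] => st
  | (q, r) :: rest =>
    if st.2 > n then st
    else pvAInner n (st.1.insert st.2 (q, r), st.2 + 1) rest

-- the while loop; fuel 50 only makes it total — the radius-50 cap means it is never exhausted
def pvALoop (n : Int) : Nat → (PySem.Dict Int (Int × Int) × Int) → Int → PySem.Dict Int (Int × Int)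
  | 0, st, _ => st.1
  | fuel + 1, st, radius =>
    if st.2 ≤ n then
      let st' := pvAInner n st (hex_ring 0 0 radius)
      if radius + 1 > 50 then st'.1
      else pvALoop n fuel st' (radius + 1)
    else st.1

def reconstruct_coordinates (total_hexes : Int) : List (Int × Int × Int) :=
  (pvALoop total_hexes 50 (PySem.Dict.ofList [((1 : Int), ((0 : Int), (0 : Int)))], 2) 1).items

-- ===== PORT B =====
def RING_CORNERS : List (Int × Int) := [(-1,1),(0,1),(1,0),(1,-1),(0,-1),(-1,0)]

-- `while 3*r*(r+1) <= k: r += 1`; fuel 50 only makes it total (k ≤ 7649 here, so it never runs out)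
def pvBRadius (k : Int) : Nat → Int → Int
  | 0, r => r
  | fuel + 1, r => if 3 * r * (r + 1) ≤ k then pvBRadius k fuel (r + 1) else r

def reconstruct_coordinates_alt (total_hexes : Int) : List (Int × Int × Int) :=
  let last := min total_hexes 7651
  ((PySem.List.pyRange 2 (last + 1) 1).foldl
    (fun (coords : PySem.Dict Int (Int × Int)) hex_id =>
      let k := hex_id - 2
      let r := pvBRadius k 50 1
      let offset := k - 3 * (r - 1) * r
      let side := PySem.Int.floordiv offset r
      let step := PySem.Int.mod offset r
      let c := PySem.List.pyGetD RING_CORNERS side (0, 0)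
      let d := PySem.List.pyGetD HEX_DIRECTIONS side (0, 0)
      coords.insert hex_id (c.1 * r + d.1 * step, c.2 * r + d.2 * step))
    (PySem.Dict.ofList [((1 : Int), ((0 : Int), (0 : Int)))])).items

-- ===== PRECONDITION & SPEC =====
def Spec_reconstruct_coordinates (total_hexes : Int) (out : List (Int × Int × Int)) : Prop := out = reconstruct_coordinates_alt total_hexes
instance (total_hexes : Int) (out : List (Int × Int × Int)) : Decidable (Spec_reconstruct_coordinates total_hexes out) := by unfold Spec_reconstruct_coordinates; infer_instance

-- ===== CLAIM (what is proved, stated in full; the proofs are below) =====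
def Claim_equal_reconstruct_coordinates : Prop := ∀ (total_hexes : Int), Dom_reconstruct_coordinates total_hexes → Spec_reconstruct_coordinates total_hexes (reconstruct_coordinates total_hexes)

-- ===== LEMMAS AND PROOFS =====

-- the coordinate B assigns to a given hex id (the exact body of B's loop)
def pvCoordB (hex_id : Int) : Int × Int :=
  let k := hex_id - 2
  let r := pvBRadius k 50 1
  let offset := k - 3 * (r - 1) * r
  let side := PySem.Int.floordiv offset r
  let step := PySem.Int.mod offset r
  let c := PySem.List.pyGetD RING_CORNERS side (0, 0)
  let d := PySem.List.pyGetD HEX_DIRECTIONS side (0, 0)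
  (c.1 * r + d.1 * step, c.2 * r + d.2 * step)

-- the dict contents after ids 2..m-1 have been assigned
def pvEntries (m : Int) : List (Int × Int × Int) :=
  ((1 : Int), ((0 : Int), (0 : Int))) ::
    (PySem.List.pyRange 2 m 1).map (fun id => (id, pvCoordB id))

lemma pvEntries_keys_lt (m : Int) (hm : 2 ≤ m) : ∀ p ∈ pvEntries m, p.1 < m := by
  intro p hp
  simp only [pvEntries, List.mem_cons, List.mem_map] at hp
  rcases hp with rfl | ⟨id, hid, rfl⟩
  · simpa using by omega
  · have := (PySem.List.mem_pyRange_one).1 hid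
    simpa using this.2

lemma B_eq (n : Int) : reconstruct_coordinates_alt n = pvEntries (min n 7651 + 1) := by
  have h : reconstruct_coordinates_alt n =
      ((PySem.List.pyRange 2 (min n 7651 + 1) 1).foldl
        (fun (d : PySem.Dict Int (Int × Int)) id => d.insert id (pvCoordB id))
        (PySem.Dict.ofList [((1 : Int), ((0 : Int), (0 : Int)))])).items := rfl
  rw [h, PySem.Dict.items_foldl_insert_fresh (k := fun a => a) (v := pvCoordB)]
  · rfl
  · intro a ha
    have h2 := (PySem.List.mem_pyRange_one).1 ha
    have hD : PySem.Dict.ofList [((1 : Int), ((0 : Int), (0 : Int)))] =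
        PySem.Dict.mk [((1 : Int), ((0 : Int), (0 : Int)))] := by decide
    rw [hD]
    simp
    omega
  · simpa using PySem.List.nodup_pyRange_one 2 (min n 7651 + 1)

-- R1: pvBRadius finds the unique ring radius
lemma bRadius_char : ∀ (fuel : Nat) (k r0 r : Int), 1 ≤ r0 → r0 ≤ r →
    3 * (r - 1) * r ≤ k → k < 3 * r * (r + 1) → r - r0 < fuel →
    pvBRadius k fuel r0 = r := by
  intro fuel
  induction fuel with
  | zero => intro k r0 r h1 h2 _ _ h5; omega
  | succ fuel ih =>
    intro k r0 r h1 h2 h3 h4 h5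
    rw [pvBRadius]
    by_cases hc : 3 * r0 * (r0 + 1) ≤ k
    · have hne : r0 ≠ r := by
        intro h; subst h; omega
      rw [if_pos hc]
      exact ih k (r0 + 1) r (by omega) (by omega) h3 h4 (by omega)
    · have : r0 = r := by
        by_contra hne
        have hlt : r0 + 1 ≤ r := by omega
        have hmono : 3 * r0 * (r0 + 1) ≤ 3 * (r - 1) * r := by nlinarith
        omega
      rw [if_neg hc, this]

-- one side of A's ring walk: a fold that appends the current point and steps by d
lemma side_fold (d : Int × Int) (n : Nat) : ∀ (acc : List (Int × Int)) (q0 r0 : Int),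
    (PySem.List.pyRange 0 (n : Int) 1).foldl
      (fun (st : List (Int × Int) × Int × Int) _ =>
        (st.1 ++ [(st.2.1, st.2.2)], st.2.1 + d.1, st.2.2 + d.2)) (acc, q0, r0)
    = (acc ++ (List.range n).map
          (fun j : Nat => ((q0 + d.1 * (j : Int), r0 + d.2 * (j : Int)) : Int × Int)),
        q0 + d.1 * (n : Int), r0 + d.2 * (n : Int)) := by
  induction n with
  | zero =>
    intro acc q0 r0
    rw [PySem.List.pyRange_one_eq_nil (by simp)]
    simp
  | succ n ih =>
    intro acc q0 r0
    have hcast : ((n + 1 : Nat) : Int) = (n : Int) + 1 := by push_cast; ring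
    rw [hcast, PySem.List.pyRange_one_succ_right (by positivity), List.foldl_append, ih]
    simp only [List.foldl_cons, List.foldl_nil, List.range_succ, List.map_append, List.map_cons,
      List.map_nil, List.append_assoc]
    refine congrArg₂ Prod.mk rfl (congrArg₂ Prod.mk ?_ ?_) <;> push_cast <;> ring

-- R6: B's formula at id = ringStart r + i*r + j
lemma coordB_at (r i j : Int) (h1 : 1 ≤ r) (h50 : r ≤ 50) (hi0 : 0 ≤ i) (hi6 : i < 6)
    (hj0 : 0 ≤ j) (hjr : j < r) :
    pvCoordB (2 + 3 * (r - 1) * r + i * r + j) =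
      ((PySem.List.pyGetD RING_CORNERS i (0, 0)).1 * r +
        (PySem.List.pyGetD HEX_DIRECTIONS i (0, 0)).1 * j,
       (PySem.List.pyGetD RING_CORNERS i (0, 0)).2 * r +
        (PySem.List.pyGetD HEX_DIRECTIONS i (0, 0)).2 * j) := by
  have hir0 : 0 ≤ i * r := by positivity
  have hir5 : i * r ≤ 5 * r := by nlinarith
  have hk : 2 + 3 * (r - 1) * r + i * r + j - 2 = 3 * (r - 1) * r + (i * r + j) := by ring
  have hkrange : 3 * (r - 1) * r ≤ 3 * (r - 1) * r + (i * r + j) ∧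
      3 * (r - 1) * r + (i * r + j) < 3 * r * (r + 1) := by
    constructor
    · omega
    · nlinarith
  have hrad : pvBRadius (3 * (r - 1) * r + (i * r + j)) 50 1 = r :=
    bRadius_char 50 _ 1 r (by omega) (by omega) hkrange.1 hkrange.2 (by omega)
  simp only [pvCoordB, hk, hrad]
  have hoff : 3 * (r - 1) * r + (i * r + j) - 3 * (r - 1) * r = i * r + j := by ring
  rw [hoff]
  have hdivd : PySem.Int.floordiv (i * r + j) r = i := by
    rw [PySem.Int.floordiv_eq_iff_of_pos (by omega)]
    constructor
    · omega
    · nlinarith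
  have hmodd : PySem.Int.mod (i * r + j) r = j := by
    have := PySem.Int.floordiv_mul_add_mod (i * r + j) r
    rw [hdivd] at this
    omega
  rw [hdivd, hmodd]

-- R5: one side of the id range is one side of the walk
lemma side_eq (n : Nat) (i a q0 r0 : Int) (h1 : 1 ≤ n) (h50 : n ≤ 50) (hi0 : 0 ≤ i) (hi6 : i < 6)
    (ha : a = 2 + 3 * ((n : Int) - 1) * (n : Int) + i * (n : Int))
    (hq0 : q0 = (PySem.List.pyGetD RING_CORNERS i (0, 0)).1 * (n : Int))
    (hr0 : r0 = (PySem.List.pyGetD RING_CORNERS i (0, 0)).2 * (n : Int)) :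
    (List.range n).map (fun j : Nat =>
        ((q0 + (PySem.List.pyGetD HEX_DIRECTIONS i (0, 0)).1 * (j : Int),
          r0 + (PySem.List.pyGetD HEX_DIRECTIONS i (0, 0)).2 * (j : Int)) : Int × Int))
      = (PySem.List.pyRange a (a + (n : Int)) 1).map pvCoordB := by
  apply List.ext_getElem
  · simp [List.length_map, List.length_range, PySem.List.length_pyRange_one]
  · intro k hk1 hk2
    simp only [List.getElem_map, List.getElem_range, PySem.List.getElem_pyRange_one]
    have hklt : (k : Int) < (n : Int) := by
      simp only [List.length_map, List.length_range] at hk1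
      omega
    have harg : a + (k : Int) = 2 + 3 * ((n : Int) - 1) * (n : Int) + i * (n : Int) + (k : Int) := by
      rw [ha]
    rw [harg, coordB_at (n : Int) i (k : Int) (by omega) (by omega) hi0 hi6 (by omega) hklt,
      hq0, hr0]

-- each ring of A's walk is exactly B's formula over the matching id range
lemma ring_eq (r : Int) (h1 : 1 ≤ r) (h50 : r ≤ 50) :
    hex_ring 0 0 r =
      (PySem.List.pyRange (2 + 3 * (r - 1) * r) (2 + 3 * r * (r + 1)) 1).map pvCoordB := by
  obtain ⟨n, rfl⟩ : ∃ n : Nat, r = (n : Int) := ⟨r.toNat, by omega⟩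
  have h1n : 1 ≤ n := by omega
  have h50n : n ≤ 50 := by omega
  have hne : ¬((n : Int) = 0) := by omega
  have hsix : PySem.List.pyRange 0 6 1 = [0, 1, 2, 3, 4, 5] := by decide
  simp only [hex_ring, if_neg hne, hsix, List.foldl_cons, List.foldl_nil]
  rw [side_fold, side_fold, side_fold, side_fold, side_fold, side_fold]
  have hH0 : PySem.List.pyGetD HEX_DIRECTIONS 0 (0, 0) = (1, 0) := rfl
  have hH1 : PySem.List.pyGetD HEX_DIRECTIONS 1 (0, 0) = (1, -1) := rfl
  have hH2 : PySem.List.pyGetD HEX_DIRECTIONS 2 (0, 0) = (0, -1) := rfl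
  have hH3 : PySem.List.pyGetD HEX_DIRECTIONS 3 (0, 0) = (-1, 0) := rfl
  have hH4 : PySem.List.pyGetD HEX_DIRECTIONS 4 (0, 0) = (-1, 1) := rfl
  have hH5 : PySem.List.pyGetD HEX_DIRECTIONS 5 (0, 0) = (0, 1) := rfl
  have hC0 : PySem.List.pyGetD RING_CORNERS 0 (0, 0) = (-1, 1) := rfl
  have hC1 : PySem.List.pyGetD RING_CORNERS 1 (0, 0) = (0, 1) := rfl
  have hC2 : PySem.List.pyGetD RING_CORNERS 2 (0, 0) = (1, 0) := rfl
  have hC3 : PySem.List.pyGetD RING_CORNERS 3 (0, 0) = (1, -1) := rfl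
  have hC4 : PySem.List.pyGetD RING_CORNERS 4 (0, 0) = (0, -1) := rfl
  have hC5 : PySem.List.pyGetD RING_CORNERS 5 (0, 0) = (-1, 0) := rfl
  have hend : 2 + 3 * ((n : Int)) * ((n : Int) + 1) =
      2 + 3 * ((n : Int) - 1) * (n : Int) + (n : Int) + (n : Int) + (n : Int) + (n : Int) +
        (n : Int) + (n : Int) := by ring
  rw [hend]
  have hn0 : (0 : Int) ≤ (n : Int) := by omega
  rw [PySem.List.pyRange_one_append (2 + 3 * ((n : Int) - 1) * (n : Int))
    (2 + 3 * ((n : Int) - 1) * (n : Int) + (n : Int)) _ (by linarith) (by linarith)]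
  rw [PySem.List.pyRange_one_append (2 + 3 * ((n : Int) - 1) * (n : Int) + (n : Int))
    (2 + 3 * ((n : Int) - 1) * (n : Int) + (n : Int) + (n : Int)) _ (by linarith) (by linarith)]
  rw [PySem.List.pyRange_one_append (2 + 3 * ((n : Int) - 1) * (n : Int) + (n : Int) + (n : Int))
    (2 + 3 * ((n : Int) - 1) * (n : Int) + (n : Int) + (n : Int) + (n : Int)) _ (by linarith)
    (by linarith)]
  rw [PySem.List.pyRange_one_append
    (2 + 3 * ((n : Int) - 1) * (n : Int) + (n : Int) + (n : Int) + (n : Int))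
    (2 + 3 * ((n : Int) - 1) * (n : Int) + (n : Int) + (n : Int) + (n : Int) + (n : Int)) _
    (by linarith) (by linarith)]
  rw [PySem.List.pyRange_one_append
    (2 + 3 * ((n : Int) - 1) * (n : Int) + (n : Int) + (n : Int) + (n : Int) + (n : Int))
    (2 + 3 * ((n : Int) - 1) * (n : Int) + (n : Int) + (n : Int) + (n : Int) + (n : Int) + (n : Int))
    _ (by linarith) (by linarith)]
  simp only [List.map_append, List.nil_append, List.append_assoc]
  congr 1
  · exact side_eq n 0 _ _ _ h1n h50n (by norm_num) (by norm_num) (by ring)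
      (by simp [hH0, hH1, hH2, hH3, hH4, hH5, hC0, hC1, hC2, hC3, hC4, hC5]; try push_cast; try ring) (by simp [hH0, hH1, hH2, hH3, hH4, hH5, hC0, hC1, hC2, hC3, hC4, hC5]; try push_cast; try ring)
  congr 1
  · exact side_eq n 1 _ _ _ h1n h50n (by norm_num) (by norm_num) (by ring)
      (by simp [hH0, hH1, hH2, hH3, hH4, hH5, hC0, hC1, hC2, hC3, hC4, hC5]; try push_cast; try ring) (by simp [hH0, hH1, hH2, hH3, hH4, hH5, hC0, hC1, hC2, hC3, hC4, hC5]; try push_cast; try ring)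
  congr 1
  · exact side_eq n 2 _ _ _ h1n h50n (by norm_num) (by norm_num) (by ring)
      (by simp [hH0, hH1, hH2, hH3, hH4, hH5, hC0, hC1, hC2, hC3, hC4, hC5]; try push_cast; try ring) (by simp [hH0, hH1, hH2, hH3, hH4, hH5, hC0, hC1, hC2, hC3, hC4, hC5]; try push_cast; try ring)
  congr 1
  · exact side_eq n 3 _ _ _ h1n h50n (by norm_num) (by norm_num) (by ring)
      (by simp [hH0, hH1, hH2, hH3, hH4, hH5, hC0, hC1, hC2, hC3, hC4, hC5]; try push_cast; try ring)
      (by simp [hH0, hH1, hH2, hH3, hH4, hH5, hC0, hC1, hC2, hC3, hC4, hC5]; try push_cast; try ring)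
  congr 1
  · exact side_eq n 4 _ _ _ h1n h50n (by norm_num) (by norm_num) (by ring)
      (by simp [hH0, hH1, hH2, hH3, hH4, hH5, hC0, hC1, hC2, hC3, hC4, hC5]; try push_cast; try ring)
      (by simp [hH0, hH1, hH2, hH3, hH4, hH5, hC0, hC1, hC2, hC3, hC4, hC5]; try push_cast; try ring)
  · exact side_eq n 5 _ _ _ h1n h50n (by norm_num) (by norm_num) (by ring)
      (by simp [hH0, hH1, hH2, hH3, hH4, hH5, hC0, hC1, hC2, hC3, hC4, hC5]; try push_cast; try ring)
      (by simp [hH0, hH1, hH2, hH3, hH4, hH5, hC0, hC1, hC2, hC3, hC4, hC5]; try push_cast; try ring)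

lemma inner_spec (n : Int) : ∀ (t : Nat) (s : Int) (es : List (Int × Int × Int)),
    s ≤ n + 1 → (∀ p ∈ es, p.1 < s) →
    pvAInner n (⟨es⟩, s) ((PySem.List.pyRange s (s + t) 1).map pvCoordB) =
      (⟨es ++ (PySem.List.pyRange s (min (n + 1) (s + t)) 1).map (fun id => (id, pvCoordB id))⟩,
        min (n + 1) (s + t)) := by
  intro t
  induction t with
  | zero =>
    intro s es hs hk
    have hmin : min (n + 1) (s + ((0 : Nat) : Int)) = s := by simp; omega
    rw [hmin, PySem.List.pyRange_one_eq_nil (by simp)]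
    simp [pvAInner]
  | succ t ih =>
    intro s es hs hk
    have hb : s + ((t + 1 : Nat) : Int) = (s + 1) + (t : Int) := by push_cast; ring
    rw [hb, PySem.List.pyRange_one_cons (by omega), List.map_cons]
    rcases hc : pvCoordB s with ⟨cq, cr⟩
    rw [pvAInner]
    by_cases hsn : s > n
    · have hseq : s = n + 1 := by omega
      have hmin : min (n + 1) (s + 1 + (t : Int)) = s := by omega
      rw [if_pos hsn, hmin, PySem.List.pyRange_one_eq_nil (by omega)]
      simp
    · rw [if_neg hsn]
      have hcf : (PySem.Dict.mk es).contains s = false := by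
        by_contra h
        have h' : (PySem.Dict.mk es).contains s = true := by
          cases hcc : (PySem.Dict.mk es).contains s <;> simp_all
        have := (PySem.Dict.contains_iff_mem_keys _ _).1 h'
        simp only [PySem.Dict.keys_mk, List.mem_map] at this
        obtain ⟨p, hp, hps⟩ := this
        have := hk p hp
        omega
      have hins : (PySem.Dict.mk es).insert s (cq, cr) =
          PySem.Dict.mk (es ++ [(s, (cq, cr))]) := by
        apply PySem.Dict.ext
        rw [PySem.Dict.items_insert_of_not_contains _ _ hcf]
      rw [hins, ← hc]
      have hkeys' : ∀ p ∈ es ++ [(s, pvCoordB s)], p.1 < s + 1 := by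
        intro p hp
        rcases List.mem_append.1 hp with h | h
        · have := hk p h; omega
        · simp at h; subst h; simp
      have := ih (s + 1) (es ++ [(s, pvCoordB s)]) (by omega) hkeys'
      rw [this]
      have hmin : min (n + 1) (s + 1 + (t : Int)) = min (n + 1) (s + ((t + 1 : Nat) : Int)) := by
        push_cast; ring_nf
      have hlt : s < min (n + 1) (s + 1 + (t : Int)) := by omega
      rw [PySem.List.pyRange_one_cons hlt, List.map_cons, hmin]
      simp [List.append_assoc]

lemma loop_spec (n : Int) : ∀ (fuel : Nat) (radius cur : Int),
    radius = 51 - (fuel : Int) → 1 ≤ fuel → fuel ≤ 50 →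
    cur = min (n + 1) (2 + 3 * (radius - 1) * radius) → 2 ≤ cur →
    pvALoop n fuel (⟨pvEntries cur⟩, cur) radius = ⟨pvEntries (min (n + 1) 7652)⟩ := by
  intro fuel
  induction fuel with
  | zero => intro radius cur _ h1 _ _ _; omega
  | succ fuel ih =>
    intro radius cur hr hf1 hf50 hcur hcur2
    have hrad1 : 1 ≤ radius := by omega
    have hrad50 : radius ≤ 50 := by omega
    rw [pvALoop]
    by_cases hle : cur ≤ n
    · rw [if_pos hle]
      have hcureq : cur = 2 + 3 * (radius - 1) * radius := by
        rcases min_choice (n + 1) (2 + 3 * (radius - 1) * radius) with h | h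
        · rw [h] at hcur; omega
        · rw [h] at hcur; exact hcur
      -- rewrite the ring as B's formula over the id range
      have hre := ring_eq radius hrad1 hrad50
      set t : Nat := (6 * radius).toNat with ht
      have htcast : (t : Int) = 6 * radius := by omega
      have hends : 2 + 3 * (radius - 1) * radius + 6 * radius = 2 + 3 * radius * (radius + 1) := by
        ring
      have hre2 : hex_ring 0 0 radius = (PySem.List.pyRange cur (cur + (t : Int)) 1).map pvCoordB := by
        rw [hre, hcureq, htcast, hends]
      rw [hre2]
      have hinner := inner_spec n t cur (pvEntries cur) (by omega) (pvEntries_keys_lt cur hcur2)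
      rw [hinner]
      set m : Int := min (n + 1) (cur + (t : Int)) with hm
      have hm2 : 2 ≤ m := by omega
      have hcurm : cur ≤ m := by omega
      have hfront : pvEntries cur ++ (PySem.List.pyRange cur m 1).map (fun id => (id, pvCoordB id)) =
          pvEntries m := by
        simp only [pvEntries]
        rw [PySem.List.pyRange_one_append 2 cur m hcur2 hcurm, List.map_append]
        simp
      rw [hfront]
      by_cases h50 : radius + 1 > 50
      · rw [if_pos h50]
        have hr50 : radius = 50 := by omega
        have : m = min (n + 1) 7652 := by
          rw [hm, htcast, hcureq, hr50]; norm_num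
        rw [this]
      · rw [if_neg h50]
        have hmeq : m = min (n + 1) (2 + 3 * (radius + 1 - 1) * (radius + 1)) := by
          rw [hm, htcast, hcureq]
          have : 2 + 3 * (radius - 1) * radius + 6 * radius =
              2 + 3 * (radius + 1 - 1) * (radius + 1) := by ring
          rw [this]
        exact ih (radius + 1) m (by omega) (by omega) (by omega) hmeq hm2
    · rw [if_neg hle]
      have hcureq : cur = n + 1 := by
        rcases min_choice (n + 1) (2 + 3 * (radius - 1) * radius) with h | h
        · rw [h] at hcur; exact hcur
        · rw [h] at hcur; omega
      have hbound : 2 + 3 * (radius - 1) * radius ≤ 7352 := by nlinarith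
      have : min (n + 1) 7652 = cur := by
        rcases min_choice (n + 1) (2 + 3 * (radius - 1) * radius) with h | h
        · rw [h] at hcur; omega
        · rw [h] at hcur; omega
      rw [this]

-- ===== VERDICT (by name: the statement is the Claim_ definition above) =====
theorem reconstruct_coordinates_spec : Claim_equal_reconstruct_coordinates := by
  intro n _
  show reconstruct_coordinates n = reconstruct_coordinates_alt n
  rw [B_eq]
  by_cases h2 : 2 ≤ n
  · have h0 : (PySem.Dict.ofList [((1 : Int), ((0 : Int), (0 : Int)))], (2 : Int)) =
        ((⟨pvEntries 2⟩ : PySem.Dict Int (Int × Int)), (2 : Int)) := by decide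
    have hmin2 : (2 : Int) = min (n + 1) (2 + 3 * ((1 : Int) - 1) * 1) := by
      norm_num
      omega
    have hloop := loop_spec n 50 1 2 (by norm_num) (by norm_num) (by norm_num)
      hmin2 (by norm_num)
    have : reconstruct_coordinates n = (pvEntries (min (n + 1) 7652)) := by
      unfold reconstruct_coordinates
      rw [h0, hloop]
    rw [this]
    have : min n 7651 + 1 = min (n + 1) 7652 := by omega
    rw [this]
  · unfold reconstruct_coordinates
    have : ¬ ((2 : Int) ≤ n) := h2
    rw [show (50 : Nat) = 49 + 1 from rfl, pvALoop, if_neg this]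
    have hmin : min n 7651 = n := by omega
    rw [hmin]
    simp only [pvEntries]
    rw [PySem.List.pyRange_one_eq_nil (by omega)]
    rfl
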